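-- pv_equiv track=rewrite | github.com/RiyadHassen/Competitive-programming | dfs/red_blue.py | red_blue
-- ===== SOURCE A (Python) =====
-- def red_blue(l, s):
--     count = 0
--     prev = s[0]
--     result = []
--     if s[0] == "?":
--         for i in range(len(s)):
--             if s[i] == "?":
--                 count += 1
--             elif s[i] == "B":
--                 prev = "B" if count % 2 == 0 else "R"
--                 break
--             else:
--                 prev = "R" if count % 2 == 0 else "B"
--                 break
--     if prev == '?':
--         prev = 'B'
--     result.append(prev)
--     for i in range(1, len(s)):
--         if s[i] == "?":
--             if prev == "B":
--                 result.append("R")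
--
--             else:
--                 result.append("B")
--         else:
--             result.append(s[i])
--         prev = result[-1]
--
--     return "".join(result)
-- ===== SOURCE B (Python) =====
-- def red_blue(l, s):
--     n = len(s)
--     first = next(((j, 'B' if s[j] == 'B' else 'R') for j in range(n) if s[j] != '?'), None)
--     out = []
--     anchor = None
--     for i, c in enumerate(s):
--         if c != '?':
--             out.append(c)
--             anchor = (i, 'B' if c == 'B' else 'R')
--         elif anchor is not None:
--             j, a = anchor
--             out.append(a if (i - j) % 2 == 0 else ('R' if a == 'B' else 'B'))
--         elif first is not None:
--             j, a = first
--             out.append(a if (j - i) % 2 == 0 else ('R' if a == 'B' else 'B'))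
--         else:
--             out.append('B' if i % 2 == 0 else 'R')
--     return ''.join(out)
-- ===== Notes on version B (the rewrite author's own statement) =====
-- stated objective: alternative
-- what changed: A fills '?' sequentially, each output character being the flip of the previously emitted one after a special lookahead for the first character; B computes every position independently from the nearest concrete character at or before it (or the first concrete character for the leading run, 'B' if none) using the parity of the distance.
import Mathlib
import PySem

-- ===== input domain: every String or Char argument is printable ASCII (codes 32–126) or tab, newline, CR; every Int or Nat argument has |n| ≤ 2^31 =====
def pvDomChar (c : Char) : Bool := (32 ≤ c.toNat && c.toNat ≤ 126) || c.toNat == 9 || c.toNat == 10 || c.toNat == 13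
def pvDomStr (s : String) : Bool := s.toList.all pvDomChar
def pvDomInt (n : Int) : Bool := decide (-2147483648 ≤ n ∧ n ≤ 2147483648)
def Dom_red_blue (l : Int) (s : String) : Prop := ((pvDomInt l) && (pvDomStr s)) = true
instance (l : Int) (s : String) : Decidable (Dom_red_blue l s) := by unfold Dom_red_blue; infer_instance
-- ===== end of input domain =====

-- B replaces A's sequential "each output is the flip of the previous output" chain by
-- anchor-relative parity lookups (nearest concrete char at or before each index, first
-- concrete char for the leading run); same cost, different decomposition (objective: alternative).

-- ===== PORT A =====
-- the first 'if s[0] == "?"' scan: count '?'s until the first concrete char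
def rbFirstLoop : Int → Char → List Char → Char
  | _, prev, [] => prev
  | count, prev, c :: rest =>
    if c = '?' then rbFirstLoop (count + 1) prev rest
    else if c = 'B' then (if PySem.Int.mod count 2 = 0 then 'B' else 'R')
    else (if PySem.Int.mod count 2 = 0 then 'R' else 'B')

-- the main 'for i in range(1, len(s))' loop, result as accumulator, prev = result[-1]
def rbFillLoop : Char → List Char → List Char → List Char
  | _, result, [] => result
  | prev, result, c :: rest =>
    let nc := if c = '?' then (if prev = 'B' then 'R' else 'B') else c
    rbFillLoop nc (result ++ [nc]) rest

def red_blue (l : Int) (s : String) : String :=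
  let chars := s.toList
  match chars with
  | [] => ""   -- s[0] raises IndexError in Python; excluded by Pre_red_blue
  | c0 :: _ =>
    let prev0 := if c0 = '?' then rbFirstLoop 0 c0 chars else c0
    let prev1 := if prev0 = '?' then 'B' else prev0
    String.mk (rbFillLoop prev1 [prev1] (chars.drop 1))

-- ===== PORT B =====
-- first concrete (non-'?') character with its index, mapped to its B/R class
def rbFindFirst : Nat → List Char → Option (Nat × Char)
  | _, [] => none
  | j, c :: rest => if c ≠ '?' then some (j, if c = 'B' then 'B' else 'R') else rbFindFirst (j+1) rest

-- Source B's single loop: each position decided from its anchor and a parity, not from the previous output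
def rbGo (first : Option (Nat × Char)) : Nat → Option (Nat × Char) → List Char → List Char
  | _, _, [] => []
  | i, anchor, c :: rest =>
    if c ≠ '?' then c :: rbGo first (i+1) (some (i, if c = 'B' then 'B' else 'R')) rest
    else
      match anchor with
      | some (j, a) =>
          (if (i - j) % 2 = 0 then a else if a = 'B' then 'R' else 'B') :: rbGo first (i+1) (some (j, a)) rest
      | none =>
          match first with
          | some (j, a) =>
              (if (j - i) % 2 = 0 then a else if a = 'B' then 'R' else 'B') :: rbGo first (i+1) none rest
          | none => (if i % 2 = 0 then 'B' else 'R') :: rbGo first (i+1) none rest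

def red_blue_alt (l : Int) (s : String) : String :=
  let chars := s.toList
  String.mk (rbGo (rbFindFirst 0 chars) 0 none chars)

-- ===== PRECONDITION & SPEC =====
-- Pre_ excludes only the empty string, on which A's 's[0]' raises IndexError.
def Pre_red_blue (l : Int) (s : String) : Prop := s ≠ ""
instance (l : Int) (s : String) : Decidable (Pre_red_blue l s) := by unfold Pre_red_blue; infer_instance
def pvWitness_red_blue : Int × String := (0, "?B?R??")

def Spec_red_blue (l : Int) (s : String) (out : String) : Prop := out = red_blue_alt l s
instance (l : Int) (s : String) (out : String) : Decidable (Spec_red_blue l s out) := by unfold Spec_red_blue; infer_instance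

-- ===== CLAIM (what is proved, stated in full; the proofs are below) =====
def Claim_equal_red_blue : Prop := ∀ (l : Int) (s : String), Dom_red_blue l s → Pre_red_blue l s → Spec_red_blue l s (red_blue l s)

-- ===== LEMMAS AND PROOFS =====

-- A's flip of the previous output
def rbF (c : Char) : Char := if c = 'B' then 'R' else 'B'

-- non-accumulating form of A's fill loop
def rbChain : Char → List Char → List Char
  | _, [] => []
  | prev, c :: rest =>
    let nc := if c = '?' then rbF prev else c
    nc :: rbChain nc rest

theorem rbFillLoop_acc (rest : List Char) : ∀ (prev : Char) (result : List Char),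
    rbFillLoop prev result rest = result ++ rbChain prev rest := by
  induction rest with
  | nil => intro prev result; simp [rbFillLoop, rbChain]
  | cons c rest ih =>
      intro prev result
      simp only [rbFillLoop, rbChain, rbF, ih, List.append_assoc, List.singleton_append]

theorem rbF_map (c : Char) : rbF c = rbF (if c = 'B' then 'B' else 'R') := by
  unfold rbF; split_ifs <;> simp_all

theorem rbF_rbF {a : Char} (h : a = 'B' ∨ a = 'R') : rbF (rbF a) = a := by
  rcases h with h | h <;> simp [h, rbF]

-- the anchored regime: after a concrete character, both produce the same suffix
theorem rb_anchored (rest : List Char) : ∀ (i j : Nat) (a prev : Char) (first : Option (Nat × Char)),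
    j ≤ i → (a = 'B' ∨ a = 'R') →
    rbF prev = (if (i - j) % 2 = 0 then a else rbF a) →
    rbChain prev rest = rbGo first i (some (j, a)) rest := by
  induction rest with
  | nil => intro i j a prev first _ _ _; simp [rbChain, rbGo]
  | cons c rest ih =>
      intro i j a prev first hji ha hprev
      by_cases hc : c = '?'
      · subst hc
        simp only [rbChain, rbGo, ne_eq, not_true_eq_false, reduceIte, List.cons.injEq]
        refine ⟨by rw [hprev]; simp [rbF], ?_⟩
        have hnext : rbF (rbF prev) = (if (i + 1 - j) % 2 = 0 then a else rbF a) := by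
          rw [hprev]
          by_cases hp : (i - j) % 2 = 0
          · rw [if_pos hp, if_neg (by omega)]
          · rw [if_neg hp, if_pos (by omega)]; exact rbF_rbF ha
        exact ih (i+1) j a (rbF prev) first (by omega) ha hnext
      · simp only [rbChain, rbGo, ne_eq, hc, not_false_eq_true, if_true, if_false,
          List.cons.injEq, true_and]
        have hnext : rbF c =
            (if (i + 1 - i) % 2 = 0 then (if c = 'B' then 'B' else 'R')
             else rbF (if c = 'B' then 'B' else 'R')) := by
          rw [if_neg (by omega)]
          exact rbF_map c
        exact ih (i+1) i _ c first (by omega) (by split_ifs <;> simp) hnext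

-- the leading run of '?', ended by the first concrete character
theorem rb_lead (qs : List Char) : ∀ (i k : Nat) (a c prev : Char) (rest : List Char),
    (∀ x ∈ qs, x = '?') → i + qs.length = k → c ≠ '?' →
    a = (if c = 'B' then 'B' else 'R') →
    rbF prev = (if (k - i) % 2 = 0 then a else rbF a) →
    rbChain prev (qs ++ c :: rest) = rbGo (some (k, a)) i none (qs ++ c :: rest) := by
  induction qs with
  | nil =>
      intro i k a c prev rest _ hk hc ha _
      simp only [List.nil_append, rbChain, rbGo, ne_eq, hc, not_false_eq_true, if_true,
        if_false, List.cons.injEq, true_and]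
      have hnext : rbF c =
          (if (i + 1 - i) % 2 = 0 then (if c = 'B' then 'B' else 'R')
           else rbF (if c = 'B' then 'B' else 'R')) := by
        rw [if_neg (by omega)]
        exact rbF_map c
      exact rb_anchored rest (i+1) i _ c _ (by omega) (by split_ifs <;> simp) hnext
  | cons q qs ih =>
      intro i k a c prev rest hq hk hc ha hprev
      have hq0 : q = '?' := hq q (by simp)
      have haBR : a = 'B' ∨ a = 'R' := by rw [ha]; split_ifs <;> simp
      subst hq0
      have hik : i + 1 ≤ k := by simp at hk; omega
      simp only [List.cons_append, rbChain, rbGo, ne_eq, not_true_eq_false, reduceIte,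
        List.cons.injEq]
      refine ⟨by rw [hprev]; simp [rbF], ?_⟩
      have hnext : rbF (rbF prev) = (if (k - (i + 1)) % 2 = 0 then a else rbF a) := by
        rw [hprev]
        by_cases hp : (k - i) % 2 = 0
        · rw [if_pos hp, if_neg (by omega)]
        · rw [if_neg hp, if_pos (by omega)]; exact rbF_rbF haBR
      exact ih (i+1) k a c (rbF prev) rest (fun x hx => hq x (by simp [hx]))
        (by simp at hk ⊢; omega) hc ha hnext

-- the all-'?' regime
theorem rb_allq (qs : List Char) : ∀ (i : Nat) (prev : Char),
    (∀ x ∈ qs, x = '?') →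
    rbF prev = (if i % 2 = 0 then 'B' else 'R') →
    rbChain prev qs = rbGo none i none qs := by
  induction qs with
  | nil => intro i prev _ _; simp [rbChain, rbGo]
  | cons q qs ih =>
      intro i prev hq hprev
      have hq0 : q = '?' := hq q (by simp)
      subst hq0
      simp only [rbChain, rbGo, ne_eq, not_true_eq_false, reduceIte, List.cons.injEq]
      refine ⟨by rw [hprev], ?_⟩
      have hnext : rbF (rbF prev) = (if (i + 1) % 2 = 0 then 'B' else 'R') := by
        rw [hprev]
        by_cases hp : i % 2 = 0
        · rw [if_pos hp, if_neg (by omega)]; decide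
        · rw [if_neg hp, if_pos (by omega)]; decide
      exact ih (i+1) (rbF prev) (fun x hx => hq x (by simp [hx])) hnext

theorem rbFindFirst_allq (qs : List Char) : ∀ (j : Nat), (∀ x ∈ qs, x = '?') →
    rbFindFirst j qs = none := by
  induction qs with
  | nil => intro j _; rfl
  | cons q qs ih =>
      intro j hq
      have hq0 : q = '?' := hq q (by simp)
      subst hq0
      simp only [rbFindFirst, ne_eq, not_true_eq_false, reduceIte]
      exact ih (j+1) (fun x hx => hq x (by simp [hx]))

theorem rbFindFirst_split (qs : List Char) : ∀ (j : Nat) (c : Char) (rest : List Char),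
    (∀ x ∈ qs, x = '?') → c ≠ '?' →
    rbFindFirst j (qs ++ c :: rest) = some (j + qs.length, if c = 'B' then 'B' else 'R') := by
  induction qs with
  | nil => intro j c rest _ hc; simp [rbFindFirst, hc]
  | cons q qs ih =>
      intro j c rest hq hc
      have hq0 : q = '?' := hq q (by simp)
      subst hq0
      simp only [List.cons_append, rbFindFirst, ne_eq, not_true_eq_false, reduceIte]
      rw [ih (j+1) c rest (fun x hx => hq x (by simp [hx])) hc]
      simp; omega

theorem rbFirstLoop_allq (qs : List Char) : ∀ (count : Int) (prev : Char),
    (∀ x ∈ qs, x = '?') → rbFirstLoop count prev qs = prev := by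
  induction qs with
  | nil => intro _ _ _; rfl
  | cons q qs ih =>
      intro count prev hq
      have hq0 : q = '?' := hq q (by simp)
      subst hq0
      simp only [rbFirstLoop]
      exact ih (count+1) prev (fun x hx => hq x (by simp [hx]))

theorem rbFirstLoop_split (qs : List Char) : ∀ (count : Int) (prev c : Char) (rest : List Char),
    (∀ x ∈ qs, x = '?') → c ≠ '?' →
    rbFirstLoop count prev (qs ++ c :: rest) =
      (if c = 'B' then (if PySem.Int.mod (count + qs.length) 2 = 0 then 'B' else 'R')
       else (if PySem.Int.mod (count + qs.length) 2 = 0 then 'R' else 'B')) := by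
  induction qs with
  | nil => intro count prev c rest _ hc; simp [rbFirstLoop, hc]
  | cons q qs ih =>
      intro count prev c rest hq hc
      have hq0 : q = '?' := hq q (by simp)
      subst hq0
      simp only [List.cons_append, rbFirstLoop]
      rw [ih (count+1) prev c rest (fun x hx => hq x (by simp [hx])) hc]
      have : count + 1 + (qs.length : Int) = count + ((qs.length + 1 : Nat) : Int) := by push_cast; ring
      simp only [List.length_cons, this, if_true]
      rfl

-- decomposition of a list at its first non-'?' element
theorem rb_decomp (chars : List Char) :
    (∀ x ∈ chars, x = '?') ∨
    ∃ qs c rest, chars = qs ++ c :: rest ∧ (∀ x ∈ qs, x = '?') ∧ c ≠ '?' := by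
  induction chars with
  | nil => left; simp
  | cons c chars ih =>
      by_cases hc : c = '?'
      · subst hc
        rcases ih with h | ⟨qs, d, rest, h1, h2, h3⟩
        · left; simpa using h
        · right; exact ⟨'?' :: qs, d, rest, by simp [h1], by simpa using h2, h3⟩
      · right; exact ⟨[], c, chars, by simp, by simp, hc⟩

theorem pymod_two (k : Nat) : PySem.Int.mod ((0:Int) + (k:Int)) 2 = 0 ↔ k % 2 = 0 := by
  have h : ((0:Int) + (k:Int)) = ((k:Nat):Int) := by push_cast; ring
  rw [h, show ((2:Int)) = ((2:Nat):Int) from rfl, PySem.Int.mod_natCast]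
  omega

-- one-step evaluation lemmas for rbGo
theorem rbGo_q_none_none (i : Nat) (tl : List Char) :
    rbGo none i none ('?' :: tl) = (if i % 2 = 0 then 'B' else 'R') :: rbGo none (i+1) none tl := by
  simp [rbGo]

theorem rbGo_q_none_some (j : Nat) (a : Char) (i : Nat) (tl : List Char) :
    rbGo (some (j, a)) i none ('?' :: tl) =
      (if (j - i) % 2 = 0 then a else rbF a) :: rbGo (some (j, a)) (i+1) none tl := by
  simp [rbGo, rbF]

theorem rbGo_concrete (first : Option (Nat × Char)) (i : Nat) (anchor : Option (Nat × Char))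
    (c : Char) (tl : List Char) (hc : c ≠ '?') :
    rbGo first i anchor (c :: tl) =
      c :: rbGo first (i+1) (some (i, if c = 'B' then 'B' else 'R')) tl := by
  simp [rbGo, hc]

theorem rb_main (c0 : Char) (tl : List Char) :
    (let prev0 := if c0 = '?' then rbFirstLoop 0 c0 (c0 :: tl) else c0
     let prev1 := if prev0 = '?' then 'B' else prev0
     String.mk (rbFillLoop prev1 [prev1] ((c0 :: tl).drop 1))) =
    String.mk (rbGo (rbFindFirst 0 (c0 :: tl)) 0 none (c0 :: tl)) := by
  simp only [List.drop_succ_cons, rbFillLoop_acc, List.singleton_append]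
  rcases rb_decomp (c0 :: tl) with hall | ⟨qs, c, rest, heq, hqs, hc⟩
  · -- everything is '?'
    have hc0 : c0 = '?' := hall c0 (by simp)
    subst hc0
    have htl : ∀ x ∈ tl, x = '?' := fun x hx => hall x (by simp [hx])
    rw [rbFindFirst_allq _ 0 hall, rbGo_q_none_none]
    simp only [rbFirstLoop_allq ('?' :: tl) 0 '?' hall, reduceIte, Nat.zero_mod]
    exact congrArg String.mk (congrArg (List.cons 'B') (rb_allq tl 1 'B' htl (by decide)))
  · rcases qs with _ | ⟨q, qs'⟩
    · -- the first character is concrete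
      simp only [List.nil_append] at heq
      obtain ⟨hc0, htl⟩ : c0 = c ∧ tl = rest := ⟨by injection heq, by injection heq⟩
      subst hc0; subst htl
      have hff : rbFindFirst 0 (c0 :: tl) = some (0, if c0 = 'B' then 'B' else 'R') := by
        simp [rbFindFirst, hc]
      rw [hff, if_neg hc, if_neg hc, rbGo_concrete _ _ _ _ _ hc]
      refine congrArg String.mk (congrArg (List.cons c0) ?_)
      have hnext : rbF c0 =
          (if (0 + 1 - 0) % 2 = 0 then (if c0 = 'B' then 'B' else 'R')
           else rbF (if c0 = 'B' then 'B' else 'R')) := by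
        rw [if_neg (by omega)]
        exact rbF_map c0
      exact rb_anchored tl (0+1) 0 _ c0 _ (by omega) (by split_ifs <;> simp) hnext
    · -- a leading run of '?' of length k ≥ 1, then the first concrete character c
      have hq0 : q = '?' := hqs q (by simp)
      subst hq0
      rw [List.cons_append] at heq
      obtain ⟨hc0, htl⟩ : c0 = '?' ∧ tl = qs' ++ c :: rest := ⟨by injection heq, by injection heq⟩
      subst hc0; subst htl
      have hqs' : ∀ x ∈ qs', x = '?' := fun x hx => hqs x (by simp [hx])
      have haBR : (if c = 'B' then 'B' else 'R') = 'B' ∨ (if c = 'B' then 'B' else 'R') = 'R' := by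
        split_ifs <;> simp
      have hff := rbFindFirst_split ('?' :: qs') 0 c rest hqs hc
      rw [List.cons_append] at hff
      -- evaluate A's first loop
      have hfl : rbFirstLoop 0 '?' ('?' :: (qs' ++ c :: rest)) =
          (if (qs'.length + 1) % 2 = 0 then (if c = 'B' then 'B' else 'R')
           else rbF (if c = 'B' then 'B' else 'R')) := by
        rw [show ('?' : Char) :: (qs' ++ c :: rest) = ('?' :: qs') ++ c :: rest from rfl,
          rbFirstLoop_split ('?' :: qs') 0 '?' c rest hqs hc]
        have hm := pymod_two (('?' :: qs').length)
        simp only [List.length_cons] at hm ⊢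
        simp only [hm]
        by_cases hb : c = 'B' <;> by_cases hp : (qs'.length + 1) % 2 = 0 <;>
          simp [hb, hp, rbF]
      have hprevne : (if (qs'.length + 1) % 2 = 0 then (if c = 'B' then 'B' else 'R')
           else rbF (if c = 'B' then 'B' else 'R')) ≠ '?' := by
        rcases haBR with h | h <;> rw [h] <;> split_ifs <;> simp [rbF]
      rw [hff, rbGo_q_none_some]
      simp only [reduceIte, hfl, if_neg hprevne, List.length_cons, Nat.zero_add, Nat.sub_zero]
      refine congrArg String.mk (congrArg₂ List.cons rfl ?_)
      have hnext : rbF (if (qs'.length + 1) % 2 = 0 then (if c = 'B' then 'B' else 'R')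
            else rbF (if c = 'B' then 'B' else 'R')) =
          (if ((qs'.length + 1) - 1) % 2 = 0 then (if c = 'B' then 'B' else 'R')
           else rbF (if c = 'B' then 'B' else 'R')) := by
        by_cases hp : (qs'.length + 1) % 2 = 0
        · have h2 : ¬ ((qs'.length + 1 - 1) % 2 = 0) := by omega
          rw [if_pos hp, if_neg h2]
        · have h2 : (qs'.length + 1 - 1) % 2 = 0 := by omega
          rw [if_neg hp, if_pos h2]
          exact rbF_rbF haBR
      exact rb_lead qs' 1 (qs'.length + 1) _ c _ rest hqs' (by omega) hc rfl hnext

theorem red_blue_spec : Claim_equal_red_blue := by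
  intro l s _ hpre
  unfold Spec_red_blue red_blue red_blue_alt
  have hne : s.toList ≠ [] := by
    intro h
    exact hpre (String.toList_eq_nil_iff.mp h)
  rcases hlist : s.toList with _ | ⟨c0, tl⟩
  · exact absurd hlist hne
  · exact rb_main c0 tl
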